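-- pv_equiv track=rewrite | github.com/cmyeung25/mjslm | hk_mahjong_full_demo.py | is_thirteen_orphans
-- ===== SOURCE A (Python) =====
-- from collections import Counter
-- from dataclasses import dataclass, field
-- from typing import Dict, Iterable, List, Optional, Sequence, Tuple
--
-- @dataclass
-- class Meld:
--     """Represent a meld (chi, pon or kong)."""
--
--     type: str  # "chi", "pon", "kong"
--     tiles: List[int]
--     open: bool
--     from_player: Optional[int] = None
--
-- def is_thirteen_orphans(concealed: Sequence[int], melds: Sequence[Meld]) -> bool:
--     if melds:
--         return False
--     needed = {
--         0, 8, 9, 17, 18, 26, 27, 28, 29, 30, 31, 32, 33,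
--     }
--     counter = Counter(concealed)
--     if not needed.issubset(counter.keys()):
--         return False
--     if len(concealed) != 14:
--         return False
--     pair_found = False
--     for tile in needed:
--         if counter[tile] >= 2:
--             pair_found = True
--             break
--     return pair_found and sum(counter.values()) == 14
-- ===== SOURCE B (Python) =====
-- ORPHANS = frozenset({0, 8, 9, 17, 18, 26, 27, 28, 29, 30, 31, 32, 33})
--
--
-- def is_thirteen_orphans(concealed, melds):
--     if melds:
--         return False
--     if len(concealed) != 14:
--         return False
--     seen = set()
--     pair = False
--     for tile in concealed:
--         if tile not in ORPHANS:
--             return False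
--         if tile in seen:
--             pair = True
--         seen.add(tile)
--     return pair and len(seen) == 13
-- ===== Notes on version B (the rewrite author's own statement) =====
-- stated objective: simpler
-- what changed: Single early-exit pass over the 14 concealed tiles maintaining a seen-set and a pair flag, instead of building a Counter, a subset test over the needed set, a separate pair-scan over the needed set, and a sum of counter values.
import Mathlib
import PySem

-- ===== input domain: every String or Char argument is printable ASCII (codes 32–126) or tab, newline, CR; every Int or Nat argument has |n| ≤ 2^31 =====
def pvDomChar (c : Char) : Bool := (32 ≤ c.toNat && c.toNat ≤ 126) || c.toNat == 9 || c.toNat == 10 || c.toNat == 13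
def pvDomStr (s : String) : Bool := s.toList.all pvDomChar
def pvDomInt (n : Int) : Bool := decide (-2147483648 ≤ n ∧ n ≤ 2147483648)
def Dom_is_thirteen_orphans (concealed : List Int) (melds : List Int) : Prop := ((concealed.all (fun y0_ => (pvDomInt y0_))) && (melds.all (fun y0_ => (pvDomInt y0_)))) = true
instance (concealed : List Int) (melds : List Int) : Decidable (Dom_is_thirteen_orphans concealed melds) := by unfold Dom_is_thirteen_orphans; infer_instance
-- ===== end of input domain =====

-- B replaces A's Counter-build + subset test + pair scan + value sum by one early-exit
-- pass over the tiles maintaining a seen-set and a pair flag (objective: simpler).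

-- ===== PORT A =====
-- the 13 orphan tiles (Python's `needed` set literal; no duplicates, so the set IS this list)
def neededTiles : List Int := [0, 8, 9, 17, 18, 26, 27, 28, 29, 30, 31, 32, 33]

def is_thirteen_orphans (concealed : List Int) (melds : List Int) : Bool :=
  if !melds.isEmpty then false
  else
    let needed : PySem.Set Int := PySem.Set.ofList neededTiles
    let counter := PySem.Dict.counter concealed
    if !(PySem.Set.issubset needed counter.keys) then false
    else if concealed.length ≠ 14 then false
    else
      -- `for tile in needed: if counter[tile] >= 2: pair_found = True; break`
      -- iterates a set; the resulting flag is order-independent, ported as `any`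
      let pair_found := needed.any (fun t => decide (2 ≤ counter.getD t 0))
      pair_found && decide (counter.values.sum = (14 : Int))

-- ===== PORT B =====
def orphanTiles : List Int := [0, 8, 9, 17, 18, 26, 27, 28, 29, 30, 31, 32, 33]

-- the `for tile in concealed` loop of Source B, with its early `return False`
def altGo (seen : PySem.Set Int) (pair : Bool) : List Int → Bool
  | [] => pair && decide (PySem.Set.len seen = 13)
  | t :: ts =>
    if t ∉ orphanTiles then false
    else altGo (PySem.Set.add seen t) (pair || PySem.Set.contains seen t) ts

def is_thirteen_orphans_alt (concealed : List Int) (melds : List Int) : Bool :=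
  if !melds.isEmpty then false
  else if concealed.length ≠ 14 then false
  else altGo PySem.Set.empty false concealed

-- ===== PRECONDITION & SPEC =====
def Spec_is_thirteen_orphans (concealed : List Int) (melds : List Int) (out : Bool) : Prop := out = is_thirteen_orphans_alt concealed melds
instance (concealed : List Int) (melds : List Int) (out : Bool) : Decidable (Spec_is_thirteen_orphans concealed melds out) := by unfold Spec_is_thirteen_orphans; infer_instance

-- ===== CLAIM (what is proved, stated in full; the proofs are below) =====
def Claim_equal_is_thirteen_orphans : Prop := ∀ (concealed : List Int) (melds : List Int), Dom_is_thirteen_orphans concealed melds → Spec_is_thirteen_orphans concealed melds (is_thirteen_orphans concealed melds)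

-- ===== LEMMAS AND PROOFS =====

lemma sum_indicator (x : Int) (L : List Int) (hL : L.Nodup) :
    (L.map (fun i => if x = i then 1 else 0)).sum = (if x ∈ L then 1 else 0) := by
  induction L with
  | nil => simp
  | cons t L ih =>
    simp only [List.nodup_cons] at hL
    simp only [List.map_cons, List.sum_cons, ih hL.2, List.mem_cons]
    by_cases hxt : x = t
    · subst hxt
      simp [hL.1]
    · simp [hxt]

-- sum over a nodup list of counts = length of the filtered list
lemma sum_count_cons (L : List Int) (hL : L.Nodup) (x : Int) (xs : List Int) :
    (L.map ((x :: xs).count ·)).sum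
      = (L.map (xs.count ·)).sum + (if x ∈ L then 1 else 0) := by
  have : (L.map ((x :: xs).count ·))
      = L.map (fun i => xs.count i + (if x = i then 1 else 0)) := by
    apply List.map_congr_left
    intro i _
    simp [List.count_cons, beq_iff_eq]
  rw [this, ← sum_indicator x L hL]
  induction L with
  | nil => simp
  | cons t L ih => simp at ih ⊢; omega

lemma sum_count_eq_filter (L : List Int) (hL : L.Nodup) (xs : List Int) :
    (L.map (xs.count ·)).sum = (xs.filter (fun x => decide (x ∈ L))).length := by
  induction xs with
  | nil => simp
  | cons x xs ih =>
    rw [sum_count_cons L hL x xs, ih, List.filter_cons]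
    by_cases h : x ∈ L <;> simp [h]

lemma sum_map_lower (L : List Int) (f : Int → ℕ) (t₀ : Int) (ht₀ : t₀ ∈ L)
    (h2 : 2 ≤ f t₀) (h1 : ∀ t ∈ L, 1 ≤ f t) :
    L.length + 1 ≤ (L.map f).sum := by
  induction L with
  | nil => simp at ht₀
  | cons t L ih =>
    simp only [List.map_cons, List.sum_cons, List.length_cons]
    rcases List.mem_cons.1 ht₀ with h | h
    · subst h
      have : L.length ≤ (L.map f).sum := by
        calc L.length = (L.map (fun _ => 1)).sum := by simp
        _ ≤ (L.map f).sum := List.sum_le_sum (fun t ht => h1 t (List.mem_cons_of_mem _ ht))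
      omega
    · have := ih h (fun t ht => h1 t (List.mem_cons_of_mem _ ht))
      have := h1 t List.mem_cons_self
      omega

-- characterization of B's loop
lemma altGo_spec (ts : List Int) (seen : List Int) (pair : Bool) (hseen : seen.Nodup) :
    altGo seen pair ts
      = ((decide (∀ x ∈ ts, x ∈ orphanTiles))
          && (pair || !decide ((seen ++ ts).Nodup))
          && decide ((PySem.Set.update seen ts).length = 13)) := by
  induction ts generalizing seen pair with
  | nil =>
    have h13 : ((seen.length : Int) = 13) ↔ seen.length = 13 := by exact_mod_cast Iff.rfl
    simp [altGo, PySem.Set.len, PySem.Set.update, hseen, h13]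
    rfl
  | cons t ts ih =>
    simp only [altGo]
    by_cases hmem : t ∈ orphanTiles
    · rw [if_neg (fun h => h hmem),
        ih (PySem.Set.add seen t) (pair || PySem.Set.contains seen t)
          (PySem.Set.nodup_add seen t hseen)]
      have hupd : PySem.Set.update (PySem.Set.add seen t) ts = PySem.Set.update seen (t :: ts) := rfl
      rw [hupd]
      congr 1
      by_cases hts : t ∈ seen
      · have hadd : PySem.Set.add seen t = seen := PySem.Set.add_of_mem hts
        have hnnd : ¬ (seen ++ t :: ts).Nodup := by
          intro h
          have h2 := (List.nodup_iff_count_le_one.1 h) t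
          have h1 : 1 ≤ seen.count t := List.one_le_count_iff.2 hts
          rw [List.count_append, List.count_cons_self] at h2
          omega
        have hcon : PySem.Set.contains seen t = true := (PySem.Set.contains_iff seen t).2 hts
        simp [hadd, hnnd, hmem]
        tauto
      · have hadd : PySem.Set.add seen t = seen ++ [t] := PySem.Set.add_of_not_mem hts
        have hperm : (seen ++ [t] ++ ts).Perm (seen ++ t :: ts) := by
          simpa using (List.perm_append_comm (l₁ := seen) (l₂ := [t])).append_right ts
        have hcon : PySem.Set.contains seen t = false := by
          rw [Bool.eq_false_iff]
          intro h
          exact hts ((PySem.Set.contains_iff seen t).1 h)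
        have hnd_iff : (seen ++ [t] ++ ts).Nodup ↔ (seen ++ t :: ts).Nodup := hperm.nodup_iff
        rw [hadd, hcon]
        simp [hmem]
    · simp [hmem]

-- the two accept conditions coincide on 14-tile hands
lemma main_iff (c : List Int) (hlen : c.length = 14) :
    ((∀ t ∈ neededTiles, t ∈ c) ∧ (∃ t ∈ neededTiles, 2 ≤ c.count t))
      ↔ ((∀ x ∈ c, x ∈ neededTiles) ∧ ¬ c.Nodup ∧ (PySem.Set.ofList c).length = 13) := by
  have hLnd : neededTiles.Nodup := by decide
  have hLlen : neededTiles.length = 13 := by decide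
  constructor
  · rintro ⟨h1, t0, ht0, h2⟩
    have hcnt1 : ∀ t ∈ neededTiles, 1 ≤ c.count t := by
      intro t ht
      exact List.one_le_count_iff.2 (h1 t ht)
    have hsum : (neededTiles.map (c.count ·)).sum = (c.filter (fun x => decide (x ∈ neededTiles))).length :=
      sum_count_eq_filter _ hLnd c
    have hlow : neededTiles.length + 1 ≤ (neededTiles.map (c.count ·)).sum :=
      sum_map_lower _ _ t0 ht0 h2 hcnt1
    have hfle : (c.filter (fun x => decide (x ∈ neededTiles))).length ≤ c.length :=
      List.length_filter_le _ _
    have hfeq : (c.filter (fun x => decide (x ∈ neededTiles))).length = c.length := by omega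
    have hall : ∀ x ∈ c, x ∈ neededTiles := by
      intro x hx
      simpa using List.length_filter_eq_length_iff.1 hfeq x hx
    have hnnd : ¬ c.Nodup := by
      intro hnd
      have := (List.nodup_iff_count_le_one.1 hnd) t0
      omega
    refine ⟨hall, hnnd, ?_⟩
    have hperm : (PySem.Set.ofList c).Perm neededTiles := by
      rw [List.perm_ext_iff_of_nodup (PySem.Set.nodup_ofList c) hLnd]
      intro a
      rw [PySem.Set.mem_ofList c a]
      exact ⟨fun h => hall a h, fun h => h1 a h⟩
    rw [hperm.length_eq, hLlen]
  · rintro ⟨h1, hnnd, hl13⟩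
    have hsub : PySem.Set.ofList c ⊆ neededTiles := by
      intro a ha
      exact h1 a ((PySem.Set.mem_ofList c a).1 ha)
    have hperm : (PySem.Set.ofList c).Perm neededTiles := by
      refine ((PySem.Set.nodup_ofList c).subperm hsub).perm_of_length_le ?_
      omega
    refine ⟨?_, ?_⟩
    · intro t ht
      exact (PySem.Set.mem_ofList c t).1 (hperm.mem_iff.2 ht)
    · have : ¬ ∀ a, c.count a ≤ 1 := fun h => hnnd (List.nodup_iff_count_le_one.2 h)
      push Not at this
      obtain ⟨a, ha⟩ := this
      have hmem : a ∈ c := List.one_le_count_iff.1 (by omega)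
      exact ⟨a, h1 a hmem, by omega⟩

-- ===== VERDICT (by name: the statement is the Claim_ definition above) =====
theorem is_thirteen_orphans_spec : Claim_equal_is_thirteen_orphans := by
  intro c melds _
  unfold Spec_is_thirteen_orphans is_thirteen_orphans is_thirteen_orphans_alt
  cases melds with
  | cons m ms => simp
  | nil =>
  simp only [List.isEmpty_nil, Bool.not_true, Bool.false_eq_true, if_false]
  have hLnd : neededTiles.Nodup := by decide
  have hofL : PySem.Set.ofList neededTiles = neededTiles := PySem.Set.ofList_eq_self_of_nodup _ hLnd
  have horph : orphanTiles = neededTiles := rfl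
  rw [altGo_spec c PySem.Set.empty false List.nodup_nil]
  by_cases hlen : c.length = 14
  · -- sum of Counter values = number of tiles = 14
    have hvals : (PySem.Dict.counter c : PySem.Dict Int Int).values = (PySem.Set.ofList c).map (fun k => ((c.count k : Int))) := by
      have := PySem.Dict.values_eq_map_keys (PySem.Dict.counter c : PySem.Dict Int Int) (PySem.Dict.nodup_keys_counter c) 0
      simpa [PySem.Dict.keys_counter, PySem.Dict.getD_counter] using this
    have hsum : ((PySem.Dict.counter c : PySem.Dict Int Int).values).sum = (14 : Int) := by
      rw [hvals]
      have hnat : ((PySem.Set.ofList c).map (c.count ·)).sum = c.length := by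
        rw [sum_count_eq_filter _ (PySem.Set.nodup_ofList c) c]
        congr 1
        rw [List.filter_eq_self]
        intro a ha
        simp [PySem.Set.mem_ofList, ha]
      have hcast : ((PySem.Set.ofList c).map (fun k => ((c.count k : Int)))).sum
          = (((PySem.Set.ofList c).map (c.count ·)).sum : Int) := by
        induction (PySem.Set.ofList c) with
        | nil => simp
        | cons x xs ih => simp [ih]
      rw [hcast, hnat, hlen]
      rfl
    by_cases hsub : ∀ t ∈ neededTiles, t ∈ c
    · have hsub' : PySem.Set.issubset (PySem.Set.ofList neededTiles) (PySem.Dict.counter c : PySem.Dict Int Int).keys = true := by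
        rw [PySem.Set.issubset_iff]
        intro x hx
        rw [PySem.Dict.keys_counter, PySem.Set.mem_ofList]
        exact hsub x (by rwa [hofL] at hx)
      rw [if_neg (by rw [hsub']; simp), if_neg (by simp [hlen]), if_neg (by simp [hlen])]
      rw [Bool.eq_iff_iff]
      simp only [hofL, horph, hsum, decide_true, Bool.and_true, Bool.false_or,
        PySem.Set.empty, PySem.Set.update_nil_left, List.nil_append, Bool.and_eq_true,
        Bool.not_eq_true', decide_eq_true_eq, decide_eq_false_iff_not, List.any_eq_true,
        PySem.Dict.getD_counter]
      constructor
      · rintro ⟨t, ht, h2⟩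
        have h2' : 2 ≤ c.count t := by exact_mod_cast h2
        have := (main_iff c hlen).1 ⟨hsub, t, ht, h2'⟩
        exact ⟨⟨this.1, this.2.1⟩, this.2.2⟩
      · rintro ⟨⟨hall, hnnd⟩, h13⟩
        obtain ⟨-, t, ht, h2⟩ := (main_iff c hlen).2 ⟨hall, hnnd, h13⟩
        exact ⟨t, ht, by exact_mod_cast h2⟩
    · have hsub' : PySem.Set.issubset (PySem.Set.ofList neededTiles) (PySem.Dict.counter c : PySem.Dict Int Int).keys = false := by
        rw [← Bool.not_eq_true, PySem.Set.issubset_iff]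
        intro h
        apply hsub
        intro t ht
        have := h t (by rwa [hofL])
        rwa [PySem.Dict.keys_counter, PySem.Set.mem_ofList] at this
      rw [if_pos (by rw [hsub']; simp), if_neg (by simp [hlen])]
      symm
      rw [Bool.eq_false_iff]
      intro hR
      simp only [horph, PySem.Set.empty, PySem.Set.update_nil_left, List.nil_append,
        Bool.and_eq_true, Bool.not_eq_true', decide_eq_true_eq,
        decide_eq_false_iff_not, Bool.false_or] at hR
      obtain ⟨⟨hall, hnnd⟩, h13⟩ := hR
      exact hsub ((main_iff c hlen).2 ⟨hall, hnnd, h13⟩).1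
  · split_ifs <;> simp_all
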